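-- pv_equiv track=rewrite | github.com/PoojaH07/AI-LAB- | Hill climb.py | state_with_lowest_h
-- ===== SOURCE A (Python) =====
-- def heuristic(state):
--     h = 0
--     N = len(state)
--     for i in range(N):
--         for j in range(i + 1, N):
--             # same row or same diagonal means attack
--             if state[i] == state[j] or abs(state[i] - state[j]) == abs(i - j):
--                 h += 1
--     return h
--
-- def state_with_lowest_h(neighbors):
--     best_state = neighbors[0]
--     best_h = heuristic(best_state)
--     for s in neighbors[1:]:
--         h = heuristic(s)
--         if h < best_h:
--             best_h = h
--             best_state = s
--     return best_state, best_h
-- ===== SOURCE B (Python) =====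
-- def conflicts(state):
--     # O(N): count attacking pairs with frequency tables for rows and both diagonals,
--     # adding, for each queen, the number of earlier queens sharing its row/diagonal.
--     h = 0
--     rows = {}
--     diag = {}
--     anti = {}
--     for i, v in enumerate(state):
--         h += rows.get(v, 0) + diag.get(i - v, 0) + anti.get(i + v, 0)
--         rows[v] = rows.get(v, 0) + 1
--         diag[i - v] = diag.get(i - v, 0) + 1
--         anti[i + v] = anti.get(i + v, 0) + 1
--     return h
--
-- def state_with_lowest_h(neighbors):
--     best = min(neighbors, key=conflicts)
--     return best, conflicts(best)
-- ===== Notes on version B (the rewrite author's own statement) =====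
-- stated objective: faster
-- what changed: Replaces the O(N^2) all-pairs attack check per state with an O(N) single pass keeping row/diagonal/anti-diagonal frequency dictionaries (each queen adds the count of earlier queens sharing its row or either diagonal), and picks the best neighbor with min(key=...) instead of an explicit running-best loop.
-- outside the precondition, e.g. on state_with_lowest_h([]): A raises IndexError, B raises ValueError
import Mathlib
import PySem

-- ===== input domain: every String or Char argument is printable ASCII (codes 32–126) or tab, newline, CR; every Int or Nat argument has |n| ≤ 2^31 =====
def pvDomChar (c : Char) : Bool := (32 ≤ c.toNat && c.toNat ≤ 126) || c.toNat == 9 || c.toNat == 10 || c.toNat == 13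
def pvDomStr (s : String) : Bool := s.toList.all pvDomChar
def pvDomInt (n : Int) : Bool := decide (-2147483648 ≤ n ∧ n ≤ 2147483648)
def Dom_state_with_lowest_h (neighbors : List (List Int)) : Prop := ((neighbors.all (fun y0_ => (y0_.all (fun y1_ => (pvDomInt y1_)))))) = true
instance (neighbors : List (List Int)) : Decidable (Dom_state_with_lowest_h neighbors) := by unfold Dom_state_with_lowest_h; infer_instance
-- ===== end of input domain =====

-- B replaces A's O(N^2) all-pairs heuristic by an O(N) pass over row/diagonal frequency
-- dictionaries and picks the best neighbor with min(key=...); equivalence of the returned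
-- (state, h) pair is proved for every non-empty neighbor list.

-- ===== PORT A =====
-- the attack test of A's inner 'if' (same row, or |Δvalue| = |Δindex|)
def attB (state : List Int) (i j : Int) : Bool :=
  PySem.List.pyGetD state i 0 == PySem.List.pyGetD state j 0 ||
  (PySem.List.pyGetD state i 0 - PySem.List.pyGetD state j 0).natAbs == (i - j).natAbs

def heuristic (state : List Int) : Int :=
  (PySem.List.pyRange 0 (PySem.List.len state)).foldl (fun h i =>
    (PySem.List.pyRange (i + 1) (PySem.List.len state)).foldl
      (fun h j => if attB state i j then h + 1 else h) h) 0

def state_with_lowest_h (neighbors : List (List Int)) : List Int × Int :=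
  match PySem.List.pyGet? neighbors 0 with
  | none => ([], 0)   -- neighbors[0] raises IndexError: excluded by Pre_
  | some best_state =>
    (PySem.List.slice neighbors (some 1) none).foldl
      (fun acc s => let h := heuristic s; if h < acc.2 then (s, h) else acc)
      (best_state, heuristic best_state)

-- ===== PORT B =====
def conflicts (state : List Int) : Int :=
  ((PySem.List.enumerate state).foldl
    (fun (acc : Int × PySem.Dict Int Int × PySem.Dict Int Int × PySem.Dict Int Int) p =>
      (acc.1 + acc.2.1.getD p.2 0 + acc.2.2.1.getD (p.1 - p.2) 0 + acc.2.2.2.getD (p.1 + p.2) 0,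
       acc.2.1.modify p.2 0 (· + 1),
       acc.2.2.1.modify (p.1 - p.2) 0 (· + 1),
       acc.2.2.2.modify (p.1 + p.2) 0 (· + 1)))
    (0, PySem.Dict.empty, PySem.Dict.empty, PySem.Dict.empty)).1

def state_with_lowest_h_alt (neighbors : List (List Int)) : List Int × Int :=
  match PySem.List.min? neighbors conflicts with
  | some best => (best, conflicts best)
  | none => ([], 0)   -- min([]) raises ValueError: excluded by Pre_

-- ===== PRECONDITION & SPEC =====
-- A raises IndexError on neighbors = [] (and B's min raises ValueError there).
def Pre_state_with_lowest_h (neighbors : List (List Int)) : Prop := neighbors ≠ []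
instance (neighbors : List (List Int)) : Decidable (Pre_state_with_lowest_h neighbors) := by
  unfold Pre_state_with_lowest_h; infer_instance
def pvWitness_state_with_lowest_h : List (List Int) := [[0]]

def Spec_state_with_lowest_h (neighbors : List (List Int)) (out : List Int × Int) : Prop := out = state_with_lowest_h_alt neighbors
instance (neighbors : List (List Int)) (out : List Int × Int) : Decidable (Spec_state_with_lowest_h neighbors out) := by unfold Spec_state_with_lowest_h; infer_instance

-- ===== CLAIM (what is proved, stated in full; the proofs are below) =====
def Claim_equal_state_with_lowest_h : Prop := ∀ (neighbors : List (List Int)), Dom_state_with_lowest_h neighbors → Pre_state_with_lowest_h neighbors → Spec_state_with_lowest_h neighbors (state_with_lowest_h neighbors)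

-- ===== LEMMAS AND PROOFS =====

-- diagonal / anti-diagonal key lists of a state (proof-only notions)
def dkeys (xs : List Int) : List Int := (PySem.List.enumerate xs).map (fun p => p.1 - p.2)
def akeys (xs : List Int) : List Int := (PySem.List.enumerate xs).map (fun p => p.1 + p.2)

-- A's nested loops as a sum of inner counts
theorem heuristic_sum (s : List Int) :
    heuristic s = ((PySem.List.pyRange 0 (PySem.List.len s)).map
      (fun i => (List.countP (attB s i) (PySem.List.pyRange (i + 1) (PySem.List.len s)) : Int))).sum := by
  unfold heuristic
  simp only [PySem.List.foldl_count_if, PySem.List.foldl_add, zero_add]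

theorem pyGetD_append_lt (xs : List Int) (v : Int) {i : Int} (h0 : 0 ≤ i) (h1 : i < (xs.length : Int)) :
    PySem.List.pyGetD (xs ++ [v]) i 0 = PySem.List.pyGetD xs i 0 := by
  rw [PySem.List.pyGetD_eq_getElem _ _ h0 (by simp; omega),
      PySem.List.pyGetD_eq_getElem _ _ h0 h1]
  exact List.getElem_append_left (by omega)

theorem pyGetD_append_last (xs : List Int) (v : Int) :
    PySem.List.pyGetD (xs ++ [v]) (xs.length : Int) 0 = v := by
  rw [PySem.List.pyGetD_eq_getElem _ _ (by positivity) (by simp)]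
  simp

-- counts over the key lists as countP over the index range
theorem count_rows (xs : List Int) (v : Int) :
    xs.count v = List.countP (fun i => PySem.List.pyGetD xs i 0 == v) (PySem.List.pyRange 0 (PySem.List.len xs)) := by
  conv_lhs => rw [← PySem.List.map_pyGetD_pyRange_zero xs 0]
  simp [List.count, List.countP_map, Function.comp_def]

theorem count_dkeys (xs : List Int) (w : Int) :
    (dkeys xs).count w = List.countP (fun i => (i - PySem.List.pyGetD xs i 0) == w) (PySem.List.pyRange 0 (PySem.List.len xs)) := by
  unfold dkeys
  rw [PySem.List.enumerate_eq_map_pyRange xs 0]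
  simp [List.count, List.countP_map, Function.comp_def]

theorem count_akeys (xs : List Int) (w : Int) :
    (akeys xs).count w = List.countP (fun i => (i + PySem.List.pyGetD xs i 0) == w) (PySem.List.pyRange 0 (PySem.List.len xs)) := by
  unfold akeys
  rw [PySem.List.enumerate_eq_map_pyRange xs 0]
  simp [List.count, List.countP_map, Function.comp_def]

-- the incremental step of the O(N) heuristic
theorem heuristic_step (xs : List Int) (v : Int) :
    heuristic (xs ++ [v]) = heuristic xs + (xs.count v : Int)
      + ((dkeys xs).count ((xs.length : Int) - v) : Int)
      + ((akeys xs).count ((xs.length : Int) + v) : Int) := by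
  have hlen : PySem.List.len (xs ++ [v]) = (xs.length : Int) + 1 := by
    simp [PySem.List.len]
  have hlen2 : PySem.List.len xs = (xs.length : Int) := rfl
  have key : ∀ i ∈ PySem.List.pyRange 0 (xs.length : Int),
      (List.countP (attB (xs ++ [v]) i) (PySem.List.pyRange (i + 1) ((xs.length : Int) + 1)) : Int)
      = (List.countP (attB xs i) (PySem.List.pyRange (i + 1) (xs.length : Int)) : Int)
        + ((if PySem.List.pyGetD xs i 0 == v then (1 : Int) else 0)
           + ((if (i - PySem.List.pyGetD xs i 0) == ((xs.length : Int) - v) then (1 : Int) else 0)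
              + (if (i + PySem.List.pyGetD xs i 0) == ((xs.length : Int) + v) then (1 : Int) else 0))) := by
    intro i hi
    rw [PySem.List.mem_pyRange_one] at hi
    have hcong : List.countP (attB (xs ++ [v]) i) (PySem.List.pyRange (i + 1) (xs.length : Int))
        = List.countP (attB xs i) (PySem.List.pyRange (i + 1) (xs.length : Int)) := by
      apply List.countP_congr
      intro j hj
      rw [PySem.List.mem_pyRange_one] at hj
      unfold attB
      rw [pyGetD_append_lt xs v (by omega) (by omega), pyGetD_append_lt xs v (by omega) (by omega)]
    have hlast : ((List.countP (attB (xs ++ [v]) i) [(xs.length : Int)] : Nat) : Int)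
        = (if PySem.List.pyGetD xs i 0 == v then (1 : Int) else 0)
           + ((if (i - PySem.List.pyGetD xs i 0) == ((xs.length : Int) - v) then (1 : Int) else 0)
              + (if (i + PySem.List.pyGetD xs i 0) == ((xs.length : Int) + v) then (1 : Int) else 0)) := by
      have hv : attB (xs ++ [v]) i (xs.length : Int)
          = (PySem.List.pyGetD xs i 0 == v ||
             ((PySem.List.pyGetD xs i 0 - v).natAbs == (i - (xs.length : Int)).natAbs)) := by
        unfold attB
        rw [pyGetD_append_lt xs v (by omega) (by omega), pyGetD_append_last]
      have hiN := hi.2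
      simp only [List.countP_cons, List.countP_nil, hv, Bool.or_eq_true, beq_iff_eq, Nat.zero_add]
      split_ifs <;> push_cast <;> omega
    rw [PySem.List.pyRange_one_succ_right (by omega : i + 1 ≤ (xs.length : Int)),
        List.countP_append, hcong]
    push_cast
    rw [hlast]
  rw [heuristic_sum, heuristic_sum, hlen, hlen2,
      PySem.List.pyRange_one_succ_right (by positivity : (0 : Int) ≤ (xs.length : Int))]
  rw [List.map_append, List.sum_append, List.map_congr_left key]
  rw [PySem.List.sum_map_add_int, PySem.List.sum_map_add_int, PySem.List.sum_map_add_int]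
  rw [PySem.List.sum_map_ite_one_zero, PySem.List.sum_map_ite_one_zero, PySem.List.sum_map_ite_one_zero]
  rw [← hlen2, ← count_rows, ← count_dkeys, ← count_akeys]
  simp only [List.map_singleton, List.sum_singleton, hlen2]
  rw [PySem.List.pyRange_one_eq_nil (le_refl ((xs.length : Int) + 1))]
  simp only [List.countP_nil, Nat.cast_zero, add_zero]
  ring

-- counters extend by one modify step on an appended key
theorem counter_append_singleton (l : List Int) (k : Int) :
    PySem.Dict.counter (l ++ [k]) = (PySem.Dict.counter l).modify k 0 (· + 1) := by
  rw [PySem.Dict.counter_eq_foldl, PySem.Dict.counter_eq_foldl, List.foldl_append]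
  rfl

-- invariant of B's single pass: accumulated h is A's heuristic, the dicts are key counters
theorem conf_fold (xs : List Int) :
    (PySem.List.enumerate xs).foldl
      (fun (acc : Int × PySem.Dict Int Int × PySem.Dict Int Int × PySem.Dict Int Int) p =>
        (acc.1 + acc.2.1.getD p.2 0 + acc.2.2.1.getD (p.1 - p.2) 0 + acc.2.2.2.getD (p.1 + p.2) 0,
         acc.2.1.modify p.2 0 (· + 1),
         acc.2.2.1.modify (p.1 - p.2) 0 (· + 1),
         acc.2.2.2.modify (p.1 + p.2) 0 (· + 1)))
      (0, PySem.Dict.empty, PySem.Dict.empty, PySem.Dict.empty)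
    = (heuristic xs, PySem.Dict.counter xs, PySem.Dict.counter (dkeys xs), PySem.Dict.counter (akeys xs)) := by
  induction xs using List.reverseRecOn with
  | nil => rfl
  | append_singleton xs v ih =>
    have hd : dkeys (xs ++ [v]) = dkeys xs ++ [(xs.length : Int) - v] := by
      unfold dkeys
      rw [PySem.List.enumerate_append]
      simp [PySem.List.enumerate_cons, PySem.List.enumerate_nil]
    have ha : akeys (xs ++ [v]) = akeys xs ++ [(xs.length : Int) + v] := by
      unfold akeys
      rw [PySem.List.enumerate_append]
      simp [PySem.List.enumerate_cons, PySem.List.enumerate_nil]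
    rw [PySem.List.enumerate_append]
    simp only [PySem.List.enumerate_cons, PySem.List.enumerate_nil, zero_add]
    rw [List.foldl_append, ih]
    simp only [List.foldl_cons, List.foldl_nil]
    rw [hd, ha, heuristic_step, counter_append_singleton, counter_append_singleton,
        counter_append_singleton]
    simp [PySem.Dict.getD_counter]

theorem conflicts_eq (s : List Int) : conflicts s = heuristic s := by
  unfold conflicts
  rw [conf_fold]

-- A's running-best loop computes the first key-minimum, i.e. Python's min(…, key=k)
theorem sel (k : List Int → Int) (t : List (List Int)) : ∀ (x : List Int),
    t.foldl (fun acc s => if k s < acc.2 then (s, k s) else acc) (x, k x)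
    = (match PySem.List.min? (x :: t) k with
       | some m => (m, k m)
       | none => ([], 0)) := by
  induction t with
  | nil => intro x; simp [PySem.List.min?]
  | cons s t ih =>
    intro x
    simp only [PySem.List.min?, List.foldl_cons] at ih ⊢
    by_cases h : k s < k x <;> simp [h, ih]

-- ===== VERDICT (by name: the statement is the Claim_ definition above) =====
theorem state_with_lowest_h_spec : Claim_equal_state_with_lowest_h := by
  intro neighbors _ hpre
  obtain ⟨x, t, rfl⟩ : ∃ x t, neighbors = x :: t := by
    cases neighbors with
    | nil => exact absurd rfl hpre
    | cons x t => exact ⟨x, t, rfl⟩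
  unfold Spec_state_with_lowest_h state_with_lowest_h state_with_lowest_h_alt
  have hx : PySem.List.pyGet? (x :: t) 0 = some x := by
    simp [PySem.List.pyGet?, PySem.List.pyIdx?]
  rw [PySem.List.slice_from _ (by norm_num), hx]
  simp only [show Int.toNat 1 = 1 from rfl, List.drop_succ_cons, List.drop_zero]
  simp only [← conflicts_eq]
  rw [sel conflicts t x]
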